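-- pv_equiv track=rewrite | github.com/BelCorentin/pi-aiche-dee | src/gen_report.py | generate_caption
-- ===== SOURCE A (Python) =====
-- def generate_caption(metadata):
--     """Generate a concise, descriptive caption from metadata"""
--     if not metadata:
--         return "No metadata available"
--
--     # Focus on the most important fields and make caption concise
--     important_fields = ['task', 'condition', 'analysis_type']
--     secondary_fields = ['subject', 'component', 'timestamp']
--
--     caption_parts = []
--
--     # Add primary information first
--     for key in important_fields:
--         if key in metadata and metadata[key]:
--             # Format and add field
--             value = metadata[key]
--             # Make task and analysis_type more readable
--             if key == 'task' or key == 'analysis_type':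
--                 value = value.replace('_', ' ').title()
--             caption_parts.append(f"{key.replace('_', ' ').title()}: {value}")
--
--     # Add secondary information if available
--     for key in secondary_fields:
--         if key in metadata and metadata[key]:
--             # Format date differently
--             if key == 'timestamp':
--                 caption_parts.append(f"Date: {metadata[key]}")
--             else:
--                 caption_parts.append(f"{key.replace('_', ' ').title()}: {metadata[key]}")
--
--     # Join parts with a separator
--     return " | ".join(caption_parts) if caption_parts else "No metadata available"
-- ===== SOURCE B (Python) =====
-- def generate_caption(metadata):
--     """Generate a concise, descriptive caption from metadata"""
--     if not metadata:
--         return "No metadata available"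
--     # Invert A's loop: one scan of the metadata items, classifying each entry
--     # into one of six fixed slots; no membership tests / dict lookups at all.
--     task = condition = analysis = subject = component = date = None
--     for key, value in metadata.items():
--         if value:
--             if key == 'task':
--                 task = "Task: " + value.replace('_', ' ').title()
--             elif key == 'condition':
--                 condition = "Condition: " + value
--             elif key == 'analysis_type':
--                 analysis = "Analysis Type: " + value.replace('_', ' ').title()
--             elif key == 'subject':
--                 subject = "Subject: " + value
--             elif key == 'component':
--                 component = "Component: " + value
--             elif key == 'timestamp':
--                 date = "Date: " + value
--     parts = [p for p in (task, condition, analysis, subject, component, date) if p is not None]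
--     return " | ".join(parts) if parts else "No metadata available"
-- ===== Notes on version B (the rewrite author's own statement) =====
-- stated objective: alternative
-- what changed: Inverts the traversal: instead of A's two fixed-key loops probing the dict ('key in metadata' + lookup), B makes a single pass over the metadata items themselves, classifying each entry into one of six ordered slot variables, then emits the non-empty slots in order.
import Mathlib
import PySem

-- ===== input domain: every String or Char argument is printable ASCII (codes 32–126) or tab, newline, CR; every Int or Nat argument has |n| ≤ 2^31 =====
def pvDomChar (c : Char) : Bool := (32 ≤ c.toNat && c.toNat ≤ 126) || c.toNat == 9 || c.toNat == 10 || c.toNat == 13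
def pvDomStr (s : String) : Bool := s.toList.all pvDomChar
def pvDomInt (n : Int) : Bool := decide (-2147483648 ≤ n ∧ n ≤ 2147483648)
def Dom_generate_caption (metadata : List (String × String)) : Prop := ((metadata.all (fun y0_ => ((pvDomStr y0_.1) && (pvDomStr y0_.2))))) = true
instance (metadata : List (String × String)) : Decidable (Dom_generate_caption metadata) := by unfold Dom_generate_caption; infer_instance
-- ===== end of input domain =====

-- B inverts A's traversal: one pass over the metadata items classifying each entry into six ordered slots,
-- instead of A's two fixed-key loops probing the dict (objective: alternative; same cost).

-- Python str.title(), exact on the ASCII domain: a letter is uppercased after a non-letter, lowercased after a letter.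
def pyTitleAux : Bool → List Char → List Char
  | _, [] => []
  | prev, c :: rest =>
    (if c.isAlpha then (if prev then c.toLower else c.toUpper) else c) :: pyTitleAux c.isAlpha rest

def pyTitle (s : String) : String := String.ofList (pyTitleAux false s.toList)

-- ===== PORT A =====
def generate_caption (metadata : List (String × String)) : String :=
  if metadata = [] then "No metadata available"
  else
    let d := PySem.Dict.ofList metadata
    let important_fields := ["task", "condition", "analysis_type"]
    let secondary_fields := ["subject", "component", "timestamp"]
    -- `key in metadata and metadata[key]` ported as one guarded lookup (truthy string = nonempty)
    let parts1 := important_fields.foldl (fun acc key =>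
      match d.get? key with
      | some v =>
        if v ≠ "" then
          let value := if key = "task" ∨ key = "analysis_type"
                       then pyTitle (PySem.Str.replace v "_" " ") else v
          acc ++ [pyTitle (PySem.Str.replace key "_" " ") ++ ": " ++ value]
        else acc
      | none => acc) []
    let parts2 := secondary_fields.foldl (fun acc key =>
      match d.get? key with
      | some v =>
        if v ≠ "" then
          if key = "timestamp" then acc ++ ["Date: " ++ v]
          else acc ++ [pyTitle (PySem.Str.replace key "_" " ") ++ ": " ++ v]
        else acc
      | none => acc) parts1
    if parts2 ≠ [] then PySem.Str.join " | " parts2 else "No metadata available"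

-- ===== PORT B =====
-- the six slot variables, as a 6-tuple of Options
def pvSlots := Option String × Option String × Option String × Option String × Option String × Option String

-- the body of B's for-loop: classify one (key, value) item into its slot
def pvClassify (st : pvSlots) (kv : String × String) : pvSlots :=
  match st with
  | (t, c, a, s, co, dt) =>
    if kv.2 ≠ "" then
      if kv.1 = "task" then (some ("Task: " ++ pyTitle (PySem.Str.replace kv.2 "_" " ")), c, a, s, co, dt)
      else if kv.1 = "condition" then (t, some ("Condition: " ++ kv.2), a, s, co, dt)
      else if kv.1 = "analysis_type" then (t, c, some ("Analysis Type: " ++ pyTitle (PySem.Str.replace kv.2 "_" " ")), s, co, dt)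
      else if kv.1 = "subject" then (t, c, a, some ("Subject: " ++ kv.2), co, dt)
      else if kv.1 = "component" then (t, c, a, s, some ("Component: " ++ kv.2), dt)
      else if kv.1 = "timestamp" then (t, c, a, s, co, some ("Date: " ++ kv.2))
      else st
    else st

def generate_caption_alt (metadata : List (String × String)) : String :=
  if metadata = [] then "No metadata available"
  else
    let d := PySem.Dict.ofList metadata
    let st := d.items.foldl pvClassify (none, none, none, none, none, none)
    let parts := [st.1, st.2.1, st.2.2.1, st.2.2.2.1, st.2.2.2.2.1, st.2.2.2.2.2].filterMap id
    if parts ≠ [] then PySem.Str.join " | " parts else "No metadata available"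

-- ===== PRECONDITION & SPEC =====
def Spec_generate_caption (metadata : List (String × String)) (out : String) : Prop := out = generate_caption_alt metadata
instance (metadata : List (String × String)) (out : String) : Decidable (Spec_generate_caption metadata out) := by unfold Spec_generate_caption; infer_instance

-- ===== CLAIM (what is proved, stated in full; the proofs are below) =====
def Claim_equal_generate_caption : Prop := ∀ (metadata : List (String × String)), Dom_generate_caption metadata → Spec_generate_caption metadata (generate_caption metadata)

-- ===== LEMMAS AND PROOFS =====

-- what one slot ends up as after scanning a list of items (last successful write wins)
def pvUpd (key : String) (fmt : String → String) : Option String → List (String × String) → Option String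
  | o, [] => o
  | o, kv :: t => pvUpd key fmt (if kv.1 = key ∧ kv.2 ≠ "" then some (fmt kv.2) else o) t

def pvFmtT (v : String) : String := "Task: " ++ pyTitle (PySem.Str.replace v "_" " ")
def pvFmtC (v : String) : String := "Condition: " ++ v
def pvFmtA (v : String) : String := "Analysis Type: " ++ pyTitle (PySem.Str.replace v "_" " ")
def pvFmtS (v : String) : String := "Subject: " ++ v
def pvFmtCo (v : String) : String := "Component: " ++ v
def pvFmtD (v : String) : String := "Date: " ++ v

-- B's fold decomposes into six independent slot scans
theorem pvFoldl_classify (l : List (String × String)) :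
    ∀ t c a s co dt, l.foldl pvClassify (t, c, a, s, co, dt) =
      (pvUpd "task" pvFmtT t l, pvUpd "condition" pvFmtC c l, pvUpd "analysis_type" pvFmtA a l,
       pvUpd "subject" pvFmtS s l, pvUpd "component" pvFmtCo co l, pvUpd "timestamp" pvFmtD dt l) := by
  induction l with
  | nil => intro t c a s co dt; rfl
  | cons hd tl ih =>
    intro t c a s co dt
    obtain ⟨k, v⟩ := hd
    by_cases hv : v = ""
    · simp [List.foldl, pvClassify, pvUpd, hv, ih]
    · by_cases h1 : k = "task"
      · subst h1
        simp [List.foldl, pvClassify, pvUpd, hv, ih, pvFmtT]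
      · by_cases h2 : k = "condition"
        · subst h2
          simp [List.foldl, pvClassify, pvUpd, hv, ih, pvFmtC]
        · by_cases h3 : k = "analysis_type"
          · subst h3
            simp [List.foldl, pvClassify, pvUpd, hv, ih, pvFmtA]
          · by_cases h4 : k = "subject"
            · subst h4
              simp [List.foldl, pvClassify, pvUpd, hv, ih, pvFmtS]
            · by_cases h5 : k = "component"
              · subst h5
                simp [List.foldl, pvClassify, pvUpd, hv, ih, pvFmtCo]
              · by_cases h6 : k = "timestamp"
                · subst h6
                  simp [List.foldl, pvClassify, pvUpd, hv, ih, pvFmtD]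
                · simp [List.foldl, pvClassify, pvUpd, hv, ih, h1, h2, h3, h4, h5, h6]

theorem pvUpd_not_mem (key : String) (fmt : String → String) (o : Option String)
    (l : List (String × String)) (h : ∀ kv ∈ l, kv.1 ≠ key) : pvUpd key fmt o l = o := by
  induction l generalizing o with
  | nil => rfl
  | cons hd tl ih =>
    have hcond : ¬(hd.1 = key ∧ hd.2 ≠ "") := fun hc => h hd (List.mem_cons_self) hc.1
    simp only [pvUpd, if_neg hcond]
    exact ih o (fun kv hm => h kv (List.mem_cons_of_mem _ hm))

-- on a list with distinct keys the final slot value is determined by the first-match lookup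
theorem pvUpd_eq_get? (key : String) (fmt : String → String) (l : List (String × String))
    (hnd : (l.map Prod.fst).Nodup) :
    pvUpd key fmt none l =
      ((PySem.Dict.mk l).get? key).bind (fun v => if v = "" then none else some (fmt v)) := by
  induction l with
  | nil => rfl
  | cons hd tl ih =>
    obtain ⟨k, v⟩ := hd
    simp only [List.map_cons, List.nodup_cons] at hnd
    by_cases hk : k = key
    · subst hk
      have htl : ∀ kv ∈ tl, kv.1 ≠ k := fun kv hm hc =>
        hnd.1 (hc ▸ List.mem_map_of_mem hm)
      by_cases hv : v = ""
      · have hcond : ¬(k = k ∧ v ≠ "") := fun hc => hc.2 hv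
        rw [pvUpd, if_neg hcond, pvUpd_not_mem _ _ _ _ htl]
        simp [PySem.Dict.get?_mk_cons, hv]
      · have hcond : (k = k ∧ v ≠ "") := ⟨rfl, hv⟩
        rw [pvUpd, if_pos hcond, pvUpd_not_mem _ _ _ _ htl]
        simp [PySem.Dict.get?_mk_cons, hv]
    · have hcond : ¬(k = key ∧ v ≠ "") := fun hc => hk hc.1
      simp only [pvUpd, if_neg hcond]
      rw [ih hnd.2]
      simp [PySem.Dict.get?_mk_cons, hk]

-- one step of A's loop rewritten as "append the slot's contribution"
theorem pvOptStep (acc : List String) (m : Option String) (fmt : String → String) :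
    (match m with
     | some v => if v ≠ "" then acc ++ [fmt v] else acc
     | none => acc)
    = acc ++ (m.bind (fun v => if v = "" then none else some (fmt v))).toList := by
  cases m with
  | none => simp
  | some v => by_cases hv : v = "" <;> simp [hv]

theorem pvFilterMap_id_eq_flatten {α : Type} (l : List (Option α)) :
    l.filterMap id = (l.map Option.toList).flatten := by
  induction l with
  | nil => rfl
  | cons h t ih =>
    cases h with
    | none => simpa [List.filterMap_cons] using ih
    | some a => simpa [List.filterMap_cons] using ih

-- ===== VERDICT (by name: the statement is the Claim_ definition above) =====
theorem generate_caption_spec : Claim_equal_generate_caption := by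
  intro metadata _
  unfold Spec_generate_caption generate_caption generate_caption_alt
  by_cases hm : metadata = []
  · simp [hm]
  · simp only [if_neg hm]
    set d := PySem.Dict.ofList metadata with hd
    have hnd : (d.items.map Prod.fst).Nodup := PySem.Dict.nodup_keys_ofList metadata
    have hmk : PySem.Dict.mk d.items = d := rfl
    -- B's side
    rw [pvFoldl_classify]
    simp only [pvUpd_eq_get? _ _ _ hnd, hmk]
    -- A's side: unfold the two literal folds and decide the literal key tests
    have hc2 : ((("condition":String) = "task") ∨ (("condition":String) = "analysis_type")) ↔ False := by simp
    have hc4 : (("subject":String) = "timestamp") ↔ False := by simp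
    have hc5 : (("component":String) = "timestamp") ↔ False := by simp
    simp only [List.foldl_cons, List.foldl_nil, hc2, hc4, hc5, if_false, if_true]
    rw [pvOptStep, pvOptStep, pvOptStep, pvOptStep, pvOptStep, pvOptStep,
      pvFilterMap_id_eq_flatten]
    have lT : pyTitle (PySem.Str.replace "task" "_" " ") ++ ": " = "Task: " := by decide
    have lC : pyTitle (PySem.Str.replace "condition" "_" " ") ++ ": " = "Condition: " := by decide
    have lA : pyTitle (PySem.Str.replace "analysis_type" "_" " ") ++ ": " = "Analysis Type: " := by decide
    have lS : pyTitle (PySem.Str.replace "subject" "_" " ") ++ ": " = "Subject: " := by decide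
    have lCo : pyTitle (PySem.Str.replace "component" "_" " ") ++ ": " = "Component: " := by decide
    simp only [List.map_cons, List.map_nil, List.flatten, List.append_assoc, List.nil_append,
      List.append_eq, List.append_nil, true_or, or_true, if_true, lT, lC, lA, lS, lCo,
      pvFmtT, pvFmtC, pvFmtA, pvFmtS, pvFmtCo, pvFmtD]
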